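-- pv_equiv track=rewrite | github.com/Sillent97/DragonbornVoiceControl | runtime/shout_recognition.py | _build_shout_phrases
-- ===== SOURCE A (Python) =====
-- MAX_SHOUT_WORDS = 3
--
-- def _build_shout_phrases(words: list[list[str]], max_phrases: int) -> list[str]:
--     max_levels = max(1, min(MAX_SHOUT_WORDS, len(words)))
--     out: list[str] = []
--
--     level_phrases: list[list[str]] = [[]]
--     for i in range(max_levels):
--         new_level: list[list[str]] = []
--         for prev in level_phrases:
--             for v in words[i]:
--                 p = prev + [str(v).strip()]
--                 new_level.append(p)
--                 out.append(" ".join(p))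
--                 if len(out) >= max_phrases:
--                     return out[:max_phrases]
--         level_phrases = new_level
--     return out[:max_phrases]
-- ===== SOURCE B (Python) =====
-- MAX_SHOUT_WORDS = 3
--
-- def _build_shout_phrases(words: list[list[str]], max_phrases: int) -> list[str]:
--     # Unrolled closed form: MAX_SHOUT_WORDS is 3, so the three phrase levels are
--     # written out directly as a generator; the first max_phrases phrases are collected.
--     w1 = [str(v).strip() for v in words[0]]
--     w2 = [str(v).strip() for v in words[1]] if len(words) >= 2 else []
--     w3 = [str(v).strip() for v in words[2]] if len(words) >= 3 else []
--
--     def phrases():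
--         yield from w1
--         for a in w1:
--             for b in w2:
--                 yield a + " " + b
--         for a in w1:
--             for b in w2:
--                 for c in w3:
--                     yield a + " " + b + " " + c
--
--     out: list[str] = []
--     for p in phrases():
--         if len(out) >= max_phrases:
--             break
--         out.append(p)
--     return out
-- ===== Notes on version B (the rewrite author's own statement) =====
-- stated objective: alternative
-- what changed: Replaces the level-by-level BFS loop that carries a list-of-word-lists accumulator, joins each phrase list and early-returns mid-loop by a closed unrolled form: since MAX_SHOUT_WORDS is 3, the three phrase levels are written out directly as a string generator and the first max_phrases phrases are collected.
import Mathlib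
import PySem

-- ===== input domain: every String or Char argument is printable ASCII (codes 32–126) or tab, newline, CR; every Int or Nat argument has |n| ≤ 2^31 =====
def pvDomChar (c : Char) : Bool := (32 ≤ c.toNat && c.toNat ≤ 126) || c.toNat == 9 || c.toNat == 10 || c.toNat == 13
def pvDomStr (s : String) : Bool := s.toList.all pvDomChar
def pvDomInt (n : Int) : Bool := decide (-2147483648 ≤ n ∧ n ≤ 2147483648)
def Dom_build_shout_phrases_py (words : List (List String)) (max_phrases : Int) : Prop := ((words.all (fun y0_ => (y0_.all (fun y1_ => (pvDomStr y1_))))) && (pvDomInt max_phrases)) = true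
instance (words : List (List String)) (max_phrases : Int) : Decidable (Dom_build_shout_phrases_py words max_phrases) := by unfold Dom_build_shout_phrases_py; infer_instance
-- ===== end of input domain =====

-- B replaces A's level-by-level BFS loop (with mid-loop early returns) by a closed
-- unrolled form: the three possible phrase levels written out as comprehensions, sliced once.

-- ===== PORT A =====
-- inner 'for v in words[i]' loop; .inr r = the early 'return out[:max_phrases]'
def aWordLoop (mp : Int) (prev : List String) (wi : List String)
    (new_level : List (List String)) (out : List String) :
    (List (List String) × List String) ⊕ List String :=
  match wi with
  | [] => .inl (new_level, out)
  | v :: rest =>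
    let p := prev ++ [PySem.Str.strip v]
    let new_level := new_level ++ [p]
    let out := out ++ [PySem.Str.join " " p]
    if mp ≤ (out.length : Int) then .inr (PySem.List.slice out none (some mp))
    else aWordLoop mp prev rest new_level out

-- middle 'for prev in level_phrases' loop
def aPrevLoop (mp : Int) (prevs : List (List String)) (wi : List String)
    (new_level : List (List String)) (out : List String) :
    (List (List String) × List String) ⊕ List String :=
  match prevs with
  | [] => .inl (new_level, out)
  | prev :: rest =>
    match aWordLoop mp prev wi new_level out with
    | .inr r => .inr r
    | .inl (nl, out') => aPrevLoop mp rest wi nl out'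

-- outer 'for i in range(max_levels)' loop
def aLevelLoop (mp : Int) (words : List (List String)) (idxs : List Int)
    (level_phrases : List (List String)) (out : List String) : List String :=
  match idxs with
  | [] => PySem.List.slice out none (some mp)
  | i :: rest =>
    match aPrevLoop mp level_phrases (PySem.List.pyGetD words i []) [] out with
    | .inr r => r
    | .inl (nl, out') => aLevelLoop mp words rest nl out'

def build_shout_phrases_py (words : List (List String)) (max_phrases : Int) : List String :=
  let max_levels : Int := max 1 (min 3 (words.length : Int))
  aLevelLoop max_phrases words (PySem.List.pyRange 0 max_levels 1) [[]] []

-- ===== PORT B =====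
-- the 'for p in phrases(): stop at max_phrases' collection loop of B
def bTakeLoop (mp : Int) (out : List String) (ps : List String) : List String :=
  match ps with
  | [] => out
  | p :: rest => if mp ≤ (out.length : Int) then out else bTakeLoop mp (out ++ [p]) rest

def build_shout_phrases_py_alt (words : List (List String)) (max_phrases : Int) : List String :=
  let w1 := (words.getD 0 []).map PySem.Str.strip
  let w2 := if 2 ≤ words.length then (words.getD 1 []).map PySem.Str.strip else []
  let w3 := if 3 ≤ words.length then (words.getD 2 []).map PySem.Str.strip else []
  let phrases := w1
    ++ (w1.flatMap fun a => w2.map fun b => a ++ " " ++ b)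
    ++ (w1.flatMap fun a => w2.flatMap fun b => w3.map fun c => a ++ " " ++ b ++ " " ++ c)
  bTakeLoop max_phrases [] phrases

-- ===== PRECONDITION & SPEC =====
-- Pre_ excludes only words = [], where the Python A raises IndexError on words[0].
def Pre_build_shout_phrases_py (words : List (List String)) (_max_phrases : Int) : Prop :=
  words ≠ []
instance (words : List (List String)) (max_phrases : Int) : Decidable (Pre_build_shout_phrases_py words max_phrases) := by unfold Pre_build_shout_phrases_py; infer_instance

def pvWitness_build_shout_phrases_py : List (List String) × Int := ([["Fus", "ro"], ["dah"]], 5)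

def Spec_build_shout_phrases_py (words : List (List String)) (max_phrases : Int) (out : List String) : Prop := out = build_shout_phrases_py_alt words max_phrases
instance (words : List (List String)) (max_phrases : Int) (out : List String) : Decidable (Spec_build_shout_phrases_py words max_phrases out) := by unfold Spec_build_shout_phrases_py; infer_instance

-- ===== CLAIM (what is proved, stated in full; the proofs are below) =====
def Claim_equal_build_shout_phrases_py : Prop := ∀ (words : List (List String)) (max_phrases : Int), Dom_build_shout_phrases_py words max_phrases → Pre_build_shout_phrases_py words max_phrases → Spec_build_shout_phrases_py words max_phrases (build_shout_phrases_py words max_phrases)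

-- ===== LEMMAS AND PROOFS =====
-- one BFS level: all phrases (as word lists) obtained by extending prevs with one word of col
def emitLvl (col : List String) (prevs : List (List String)) : List (List String) :=
  prevs.flatMap (fun prev => col.map (fun v => prev ++ [PySem.Str.strip v]))

def joinSp (p : List String) : String := PySem.Str.join " " p

-- all phrases A would enumerate from the remaining levels, ignoring the cap
def fullLevels (words : List (List String)) (idxs : List Int) (prevs : List (List String)) : List String :=
  match idxs with
  | [] => []
  | i :: rest =>
    let e := emitLvl (PySem.List.pyGetD words i []) prevs
    e.map joinSp ++ fullLevels words rest e

theorem aWordLoop_eq (mp : Int) (prev : List String) :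
    ∀ (wi : List String) (nl : List (List String)) (out : List String),
      (out.length : Int) < mp →
      aWordLoop mp prev wi nl out =
        if mp ≤ (out.length : Int) + (wi.length : Int)
        then .inr ((out ++ wi.map (fun v => joinSp (prev ++ [PySem.Str.strip v]))).take mp.toNat)
        else .inl (nl ++ wi.map (fun v => prev ++ [PySem.Str.strip v]),
                   out ++ wi.map (fun v => joinSp (prev ++ [PySem.Str.strip v]))) := by
  intro wi
  induction wi with
  | nil =>
    intro nl out h
    simp [aWordLoop]
    omega
  | cons v rest ih =>
    intro nl out h
    simp only [aWordLoop]
    simp only [joinSp] at ih ⊢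
    by_cases hstop : mp ≤ ((out ++ [PySem.Str.join " " (prev ++ [PySem.Str.strip v])]).length : Int)
    · have hmp : mp = (out.length : Int) + 1 := by
        simp at hstop; omega
      rw [if_pos hstop, if_pos (by simp; omega)]
      congr 1
      rw [PySem.List.slice_to _ (by omega)]
      have h1 : mp.toNat = out.length + 1 := by omega
      simp [h1, List.take_append]
    · rw [if_neg hstop]
      have h' : ((out ++ [PySem.Str.join " " (prev ++ [PySem.Str.strip v])]).length : Int) < mp := by
        simp at hstop ⊢; omega
      rw [ih _ _ h']
      have e1 : ((out ++ [PySem.Str.join " " (prev ++ [PySem.Str.strip v])]).length : Int)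
          = (out.length : Int) + 1 := by simp
      rw [e1]
      by_cases hc : mp ≤ (out.length : Int) + ((v :: rest).length : Int)
      · rw [if_pos (by simp at hc ⊢; omega), if_pos hc]
        simp
      · rw [if_neg (by simp at hc ⊢; omega), if_neg hc]
        simp

theorem aPrevLoop_eq (mp : Int) (wi : List String) :
    ∀ (prevs : List (List String)) (nl : List (List String)) (out : List String),
      (out.length : Int) < mp →
      aPrevLoop mp prevs wi nl out =
        if mp ≤ (out.length : Int) + ((emitLvl wi prevs).length : Int)
        then .inr ((out ++ (emitLvl wi prevs).map joinSp).take mp.toNat)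
        else .inl (nl ++ emitLvl wi prevs, out ++ (emitLvl wi prevs).map joinSp) := by
  intro prevs
  induction prevs with
  | nil =>
    intro nl out h
    simp [aPrevLoop, emitLvl]
    omega
  | cons prev rest ih =>
    intro nl out h
    have hemit : emitLvl wi (prev :: rest) =
        wi.map (fun v => prev ++ [PySem.Str.strip v]) ++ emitLvl wi rest := by
      simp [emitLvl]
    have hmapj : (wi.map (fun v => prev ++ [PySem.Str.strip v])).map joinSp
         = wi.map (fun v => joinSp (prev ++ [PySem.Str.strip v])) := by
      simp [List.map_map, Function.comp_def]
    simp only [aPrevLoop]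
    rw [aWordLoop_eq mp prev wi nl out h]
    by_cases hstop : mp ≤ (out.length : Int) + (wi.length : Int)
    · rw [if_pos hstop, if_pos (by simp [hemit]; omega)]
      rw [hemit, List.map_append, hmapj, ← List.append_assoc]
      rw [List.take_append_of_le_length
        (show mp.toNat ≤ (out ++ wi.map (fun v => joinSp (prev ++ [PySem.Str.strip v]))).length by
          simp; omega)]
    · rw [if_neg hstop]
      have h' : (((out ++ wi.map (fun v => joinSp (prev ++ [PySem.Str.strip v]))).length : Int)) < mp := by
        simp; omega
      refine ((ih (nl ++ wi.map (fun v => prev ++ [PySem.Str.strip v]))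
        (out ++ wi.map (fun v => joinSp (prev ++ [PySem.Str.strip v]))) h')).trans ?_
      by_cases hc : mp ≤ (out.length : Int) + ((emitLvl wi (prev :: rest)).length : Int)
      · rw [if_pos (by simp [hemit] at hc ⊢; omega), if_pos hc]
        rw [hemit, List.map_append, hmapj]
        simp
      · rw [if_neg (by simp [hemit] at hc ⊢; omega), if_neg hc]
        rw [hemit, List.map_append, hmapj]
        simp

theorem aLevelLoop_eq (mp : Int) (words : List (List String)) (hmp : 0 < mp) :
    ∀ (idxs : List Int) (prevs : List (List String)) (out : List String),
      (out.length : Int) < mp →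
      aLevelLoop mp words idxs prevs out = (out ++ fullLevels words idxs prevs).take mp.toNat := by
  intro idxs
  induction idxs with
  | nil =>
    intro prevs out h
    simp [aLevelLoop, fullLevels]
    rw [PySem.List.slice_to _ (by omega)]
  | cons i rest ih =>
    intro prevs out h
    simp only [aLevelLoop]
    rw [aPrevLoop_eq mp (PySem.List.pyGetD words i []) prevs [] out h]
    by_cases hstop : mp ≤ (out.length : Int) + ((emitLvl (PySem.List.pyGetD words i []) prevs).length : Int)
    · rw [if_pos hstop]
      simp only [fullLevels, ← List.append_assoc]
      rw [List.take_append_of_le_length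
        (show mp.toNat ≤ (out ++ (emitLvl (PySem.List.pyGetD words i []) prevs).map joinSp).length by
          simp; omega)]
    · rw [if_neg hstop]
      refine (ih (emitLvl (PySem.List.pyGetD words i []) prevs)
        (out ++ (emitLvl (PySem.List.pyGetD words i []) prevs).map joinSp) (by simp; omega)).trans ?_
      simp [fullLevels]

theorem aWordLoop_neg (mp : Int) (hmp : mp ≤ 0) (prev : List String) (wi : List String)
    (nl : List (List String)) :
    aWordLoop mp prev wi nl [] = match wi with
      | [] => .inl (nl, [])
      | _ :: _ => .inr [] := by
  cases wi with
  | nil => simp [aWordLoop]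
  | cons v rest =>
    simp only [aWordLoop]
    rw [if_pos (by simp; omega)]
    congr 1
    by_cases h0 : mp = 0
    · subst h0
      rw [PySem.List.slice_to _ le_rfl]
      simp
    · obtain ⟨k, hk1, hk2⟩ : ∃ k : Nat, mp = -(k : Int) ∧ 0 < k :=
        ⟨(-mp).toNat, by omega, by omega⟩
      rw [hk1, PySem.List.slice_to_neg_natCast _ _ hk2]
      have hz : ([] ++ [PySem.Str.join " " (prev ++ [PySem.Str.strip v])]).length - k = 0 := by
        simp; omega
      rw [hz]
      simp

theorem aPrevLoop_neg (mp : Int) (hmp : mp ≤ 0) (wi : List String) :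
    ∀ (prevs : List (List String)) (nl : List (List String)),
      aPrevLoop mp prevs wi nl [] =
        if emitLvl wi prevs = [] then .inl (nl ++ emitLvl wi prevs, []) else .inr [] := by
  intro prevs
  induction prevs with
  | nil => intro nl; simp [aPrevLoop, emitLvl]
  | cons prev rest ih =>
    intro nl
    simp only [aPrevLoop]
    rw [aWordLoop_neg mp hmp prev wi nl]
    cases wi with
    | nil =>
      refine (ih nl).trans ?_
      simp [emitLvl]
    | cons v vs =>
      simp [emitLvl]

theorem aLevelLoop_neg (mp : Int) (hmp : mp ≤ 0) (words : List (List String)) :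
    ∀ (idxs : List Int) (prevs : List (List String)),
      aLevelLoop mp words idxs prevs [] = [] := by
  intro idxs
  induction idxs with
  | nil =>
    intro prevs
    simp [aLevelLoop, PySem.List.slice]
  | cons i rest ih =>
    intro prevs
    simp only [aLevelLoop]
    rw [aPrevLoop_neg mp hmp]
    by_cases he : emitLvl (PySem.List.pyGetD words i []) prevs = []
    · rw [if_pos he]
      simp only
      exact ih _
    · rw [if_neg he]

theorem joinSp_one (a : String) : joinSp [a] = a := by
  simp [joinSp, PySem.Str.join]

theorem joinSp_two (a b : String) : joinSp [a, b] = a ++ " " ++ b := by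
  simp [joinSp, PySem.Str.join, PySem.Chars.join_cons_cons, PySem.Chars.join_singleton]
  apply String.ext
  simp

theorem joinSp_three (a b c : String) : joinSp [a, b, c] = a ++ " " ++ b ++ " " ++ c := by
  simp [joinSp, PySem.Str.join, PySem.Chars.join_cons_cons, PySem.Chars.join_singleton]
  apply String.ext
  simp

theorem bTakeLoop_eq (mp : Int) :
    ∀ (ps : List String) (out : List String),
      bTakeLoop mp out ps = out ++ ps.take (mp - out.length).toNat := by
  intro ps
  induction ps with
  | nil => intro out; simp [bTakeLoop]
  | cons p rest ih =>
    intro out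
    simp only [bTakeLoop]
    by_cases h : mp ≤ (out.length : Int)
    · rw [if_pos h]
      have hz : (mp - (out.length : Int)).toNat = 0 := by omega
      simp [hz]
    · rw [if_neg h, ih]
      have h1 : (mp - ((out ++ [p]).length : Int)) = mp - (out.length : Int) - 1 := by
        simp; omega
      have h2 : (mp - (out.length : Int)).toNat = (mp - (out.length : Int) - 1).toNat + 1 := by
        omega
      rw [h1, h2]
      simp [List.take_succ_cons]

-- ===== VERDICT (by name: the statement is the Claim_ definition above) =====
theorem build_shout_phrases_py_spec : Claim_equal_build_shout_phrases_py := by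
  intro words mp _ hpre
  unfold Spec_build_shout_phrases_py build_shout_phrases_py build_shout_phrases_py_alt
  rw [bTakeLoop_eq]
  simp only [List.nil_append, List.length_nil, Nat.cast_zero, Int.sub_zero]
  by_cases hmp : mp ≤ 0
  · have hz : mp.toNat = 0 := by omega
    rw [hz]
    simp only [List.take_zero]
    exact aLevelLoop_neg mp hmp words _ _
  · have hpos : 0 < mp := by omega
    rw [aLevelLoop_eq mp words hpos _ _ _ (by simp; omega)]
    simp only [List.nil_append]
    congr 1
    match words, hpre with
    | [w0], _ =>
      simp [fullLevels, emitLvl, PySem.List.pyGetD, joinSp_one,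
            PySem.List.pyRange, List.flatMap_map, List.range_succ,
            Function.comp_def, List.flatMap_eq_nil_iff]
    | [w0, w1], _ =>
      simp [fullLevels, emitLvl, PySem.List.pyGetD, joinSp_one, joinSp_two,
            PySem.List.pyRange, List.flatMap_map, List.range_succ,
            Function.comp_def, List.map_flatMap, List.flatMap_eq_nil_iff]
    | w0 :: w1 :: w2 :: rest, _ =>
      have hlen : max 1 (min 3 ((w0 :: w1 :: w2 :: rest).length : Int)) = 3 := by
        simp; omega
      rw [hlen]
      have h1 : PySem.List.pyGet? (w0 :: w1 :: w2 :: rest) 1 = some w1 := by simp [pysem]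
      have h2 : PySem.List.pyGet? (w0 :: w1 :: w2 :: rest) 2 = some w2 := by simp [pysem]
      simp [fullLevels, emitLvl, PySem.List.pyGetD, h1, h2, joinSp_one, joinSp_two,
            joinSp_three, PySem.List.pyRange, List.flatMap_map, List.range_succ,
            Function.comp_def, List.map_flatMap, List.flatMap_assoc]
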